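-- pv_equiv track=rewrite | github.com/lucamuscat/truthtable | truthtable.py | createSegment
-- ===== SOURCE A (Python) =====
-- def createSegment(column, bits):
--     index = column - 1
--     size = 2**index
--     temp = []
--     for i in range(bits // (2**column)):
--         for j in range(size):
--             temp.append(0)
--         for j in range(size):
--             temp.append(1)
--     return temp
-- ===== SOURCE B (Python) =====
-- def createSegment(column, bits):
--     reps = bits // (2 ** column)
--     if reps <= 0:
--         return []
--     size = 2 ** (column - 1)
--     return [(i // size) % 2 for i in range(2 * size * reps)]
-- ===== Notes on version B (the rewrite author's own statement) =====
-- stated objective: simpler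
-- what changed: Replaces the nested block-appending loops by one flat comprehension over all positions using the closed-form value (i // size) % 2.
-- outside the precondition, e.g. on createSegment(0, 1): A raises TypeError, B raises TypeError; on createSegment(-1, 5): A raises TypeError, B raises TypeError
import Mathlib
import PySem

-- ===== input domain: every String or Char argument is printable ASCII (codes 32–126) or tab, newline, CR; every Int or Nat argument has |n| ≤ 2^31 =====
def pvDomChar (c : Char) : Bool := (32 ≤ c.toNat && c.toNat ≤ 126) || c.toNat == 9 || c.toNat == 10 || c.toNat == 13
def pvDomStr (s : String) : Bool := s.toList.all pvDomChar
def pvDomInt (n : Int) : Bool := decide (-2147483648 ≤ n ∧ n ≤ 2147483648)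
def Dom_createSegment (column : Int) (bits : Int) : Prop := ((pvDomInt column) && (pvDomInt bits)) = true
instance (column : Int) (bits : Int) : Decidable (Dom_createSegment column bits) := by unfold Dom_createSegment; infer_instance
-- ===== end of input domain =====

-- B replaces A's nested block-appending loops by one flat comprehension using the
-- closed-form value (i // size) % 2 at each position (objective: simpler).

-- ===== PORT A =====
-- index = column - 1; size = 2**index; nested loops appending 0-blocks then 1-blocks
def createSegment (column : Int) (bits : Int) : List Int :=
  let index := column - 1
  let size : Int := 2 ^ index.toNat      -- exact for column ≥ 1; for column = 0 size is unused inside Pre_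
  (PySem.List.pyRange 0 (PySem.Int.floordiv bits (2 ^ column.toNat)) 1).foldl
    (fun temp _ =>
      let temp := (PySem.List.pyRange 0 size 1).foldl (fun t _ => t ++ [(0 : Int)]) temp
      (PySem.List.pyRange 0 size 1).foldl (fun t _ => t ++ [(1 : Int)]) temp)
    []

-- ===== PORT B =====
def createSegment_alt (column : Int) (bits : Int) : List Int :=
  let reps := PySem.Int.floordiv bits (2 ^ column.toNat)
  if reps ≤ 0 then []
  else
    let size : Int := 2 ^ (column - 1).toNat
    (PySem.List.pyRange 0 (2 * size * reps) 1).map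
      (fun i => PySem.Int.mod (PySem.Int.floordiv i size) 2)

-- ===== PRECONDITION & SPEC =====
-- Python A raises TypeError (float size or float range bound) whenever column < 0,
-- and for column = 0 whenever bits ≥ 1 (range(0.5) inside the loop); on all other
-- inputs A returns normally, and Pre_ admits exactly those.
def Pre_createSegment (column : Int) (bits : Int) : Prop :=
  1 ≤ column ∨ (column = 0 ∧ bits ≤ 0)
instance (column : Int) (bits : Int) : Decidable (Pre_createSegment column bits) := by
  unfold Pre_createSegment; infer_instance

def pvWitness_createSegment : Int × Int := (2, 8)

def Spec_createSegment (column : Int) (bits : Int) (out : List Int) : Prop := out = createSegment_alt column bits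
instance (column : Int) (bits : Int) (out : List Int) : Decidable (Spec_createSegment column bits out) := by unfold Spec_createSegment; infer_instance

-- ===== CLAIM (what is proved, stated in full; the proofs are below) =====
def Claim_equal_createSegment : Prop := ∀ (column : Int) (bits : Int), Dom_createSegment column bits → Pre_createSegment column bits → Spec_createSegment column bits (createSegment column bits)

-- ===== LEMMAS AND PROOFS =====

-- the inner Python loop 'for j in range(size): temp.append(c)' appends a constant block
theorem pv_foldl_append_const (c : Int) (l : List Int) (t : List Int) :
    l.foldl (fun t _ => t ++ [c]) t = t ++ l.map (fun _ => c) := by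
  induction l generalizing t with
  | nil => simp
  | cons x xs ih => simp [List.foldl_cons, ih, List.append_assoc]

-- one constant block of B's comprehension: indices in [a, a+s) all map to the same value
theorem pv_map_const_block (s a v : Int) (hs : 0 < s)
    (hv : ∀ k : Int, a ≤ k → k < a + s →
      PySem.Int.mod (PySem.Int.floordiv k s) 2 = v) :
    (PySem.List.pyRange a (a + s) 1).map (fun i => PySem.Int.mod (PySem.Int.floordiv i s) 2)
      = (PySem.List.pyRange 0 s 1).map (fun _ => v) := by
  rw [PySem.List.pyRange_one a (a + s), PySem.List.pyRange_one 0 s,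
     show a + s - a = s by ring, show s - (0 : Int) = s by ring]
  simp only [List.map_map]
  apply List.map_congr_left
  intro k hk
  simp only [List.mem_range] at hk
  simp only [Function.comp]
  apply hv
  · omega
  · have : (k : Int) < s.toNat := by exact_mod_cast hk
    omega

-- main invariant: n outer iterations of A's loop build B's comprehension of length 2*s*n
theorem pv_loop_eq (s : Int) (hs : 0 < s) (n : Nat) :
    (PySem.List.pyRange 0 (n : Int) 1).foldl
      (fun temp _ =>
        let temp := (PySem.List.pyRange 0 s 1).foldl (fun t _ => t ++ [(0 : Int)]) temp
        (PySem.List.pyRange 0 s 1).foldl (fun t _ => t ++ [(1 : Int)]) temp)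
      []
    = (PySem.List.pyRange 0 (2 * s * (n : Int)) 1).map
        (fun i => PySem.Int.mod (PySem.Int.floordiv i s) 2) := by
  induction n with
  | zero => simp [PySem.List.pyRange_one_eq_nil]
  | succ n ih =>
    rw [show ((n + 1 : Nat) : Int) = (n : Int) + 1 by push_cast; ring,
        PySem.List.pyRange_one_succ_right (by positivity), List.foldl_append, ih]
    -- split B's range at 2*s*n and at 2*s*n + s
    have hsplit1 : PySem.List.pyRange 0 (2 * s * ((n : Int) + 1)) 1
        = PySem.List.pyRange 0 (2 * s * (n : Int)) 1
          ++ PySem.List.pyRange (2 * s * (n : Int)) (2 * s * ((n : Int) + 1)) 1 := by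
      apply PySem.List.pyRange_one_append
      · positivity
      · nlinarith [Int.natCast_nonneg n]
    have hsplit2 : PySem.List.pyRange (2 * s * (n : Int)) (2 * s * ((n : Int) + 1)) 1
        = PySem.List.pyRange (2 * s * (n : Int)) (2 * s * (n : Int) + s) 1
          ++ PySem.List.pyRange (2 * s * (n : Int) + s) (2 * s * (n : Int) + s + s) 1 := by
      rw [show 2 * s * ((n : Int) + 1) = 2 * s * (n : Int) + s + s by ring]
      apply PySem.List.pyRange_one_append <;> omega
    rw [hsplit1, hsplit2]
    simp only [List.map_append, List.foldl_cons, List.foldl_nil]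
    rw [pv_foldl_append_const, pv_foldl_append_const, List.append_assoc]
    congr 1
    congr 1
    · -- zero block
      rw [pv_map_const_block s (2 * s * (n : Int)) 0 hs]
      intro k hk1 hk2
      have hq : PySem.Int.floordiv k s = 2 * (n : Int) := by
        rw [PySem.Int.floordiv_eq_iff_of_pos hs]
        constructor <;> nlinarith
      rw [hq, PySem.Int.mod_eq_emod_of_pos (by norm_num)]
      omega
    · -- one block
      have := pv_map_const_block s (2 * s * (n : Int) + s) 1 hs ?_
      · rw [show 2 * s * (n : Int) + s + s = (2 * s * (n : Int) + s) + s by ring, this]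
      · intro k hk1 hk2
        have hq : PySem.Int.floordiv k s = 2 * (n : Int) + 1 := by
          rw [PySem.Int.floordiv_eq_iff_of_pos hs]
          constructor <;> nlinarith
        rw [hq, PySem.Int.mod_eq_emod_of_pos (by norm_num)]
        omega

-- ===== VERDICT (by name: the statement is the Claim_ definition above) =====
theorem createSegment_spec : Claim_equal_createSegment := by
  intro column bits _hdom hpre
  unfold Spec_createSegment createSegment createSegment_alt
  rcases hpre with hc | ⟨hc0, hb⟩
  · -- column ≥ 1
    have hpow : (2 : Int) ^ column.toNat = 2 * 2 ^ (column - 1).toNat := by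
      rw [show column.toNat = (column - 1).toNat + 1 by omega]
      ring
    set s : Int := 2 ^ (column - 1).toNat with hsdef
    have hs : 0 < s := by positivity
    set reps : Int := PySem.Int.floordiv bits (2 ^ column.toNat) with hreps
    by_cases hr : reps ≤ 0
    · simp only [hr, if_pos, PySem.List.pyRange_one_eq_nil hr, List.foldl_nil]
    · rw [if_neg hr]
      obtain ⟨n, hn⟩ : ∃ n : Nat, reps = (n : Int) := ⟨reps.toNat, by omega⟩
      rw [hn]
      exact pv_loop_eq s hs n
  · -- column = 0, bits ≤ 0: both sides are the empty list
    subst hc0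
    have hfd : PySem.Int.floordiv bits (2 ^ (0 : Int).toNat) = bits := by
      rw [PySem.Int.floordiv_eq_ediv_of_pos (by norm_num)]; simp
    simp only [hfd]
    rw [PySem.List.pyRange_one_eq_nil hb, if_pos hb]
    simp
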